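-- pv_equiv track=rewrite | github.com/keepwn/Altman | Source/Plugin_IronPythonCollection/Encode.py | reversed_hand
-- ===== SOURCE A (Python) =====
-- WIDTH = 24
--
-- def reversed_hand(hand):
--     reversing_chars = {"\\": "/", "(": ")"}
--     rhand = []
--     for line in hand.split("\n"):
--         rline = line.ljust(WIDTH)[::-1]
--         for lc, rc in reversing_chars.items():
--             rline = rline.replace(lc, "\n").replace(rc, lc).replace("\n", rc)
--         rhand.append(rline)
--     return "\n".join(rhand)
-- ===== SOURCE B (Python) =====
-- WIDTH = 24
--
-- SWAP = {"\\": "/", "/": "\\", "(": ")", ")": "("}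
--
-- def reversed_hand(hand):
--     out = []
--     for line in hand.split("\n"):
--         out.append(" " * (WIDTH - len(line))
--                    + "".join(SWAP.get(c, c) for c in reversed(line)))
--     return "\n".join(out)
-- ===== Notes on version B (the rewrite author's own statement) =====
-- stated objective: idiomatic
-- what changed: Replaces ljust + [::-1] slice + the per-dict-entry three-replace sentinel chain with a directly computed space prefix plus a single per-character lookup in a symmetric four-entry swap table over the reversed line.
import Mathlib
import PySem

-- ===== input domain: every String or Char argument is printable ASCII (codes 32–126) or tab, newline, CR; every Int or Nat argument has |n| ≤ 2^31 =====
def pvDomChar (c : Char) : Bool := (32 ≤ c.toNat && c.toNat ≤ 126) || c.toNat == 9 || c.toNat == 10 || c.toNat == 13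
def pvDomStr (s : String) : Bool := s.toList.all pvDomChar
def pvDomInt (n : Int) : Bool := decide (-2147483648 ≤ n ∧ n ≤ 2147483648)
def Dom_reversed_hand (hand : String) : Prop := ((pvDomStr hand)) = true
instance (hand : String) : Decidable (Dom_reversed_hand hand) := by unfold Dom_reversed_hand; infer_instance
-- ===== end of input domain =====

-- B replaces A's ljust + [::-1] slice + sentinel replace-chain by a computed space prefix plus
-- one per-character swap-table map over the reversed line (idiomatic; same asymptotic cost).

-- ===== PORT A =====
def reversed_hand (hand : String) : String :=
  -- reversing_chars = {"\\": "/", "(": ")"} iterated as .items()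
  let reversing_chars : List (List Char × List Char) := [(['\\'], ['/']), (['('], [')'])]
  let rhand := (PySem.Chars.splitOn hand.toList ['\n']).map (fun line =>
    -- line.ljust(24) ported by hand (PySem has no ljust): pad on the right with spaces to length 24 — exact
    let rline := (PySem.List.slice? (line ++ List.replicate (24 - line.length) ' ') none none (-1)).getD []
    reversing_chars.foldl (fun rl p =>
      PySem.Chars.replace (PySem.Chars.replace (PySem.Chars.replace rl p.1 ['\n']) p.2 p.1) ['\n'] p.2) rline)
  String.ofList (PySem.Chars.join ['\n'] rhand)

-- ===== PORT B =====
def pvSwap : PySem.Dict Char Char := ⟨[('\\', '/'), ('/', '\\'), ('(', ')'), (')', '(')]⟩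

def reversed_hand_alt (hand : String) : String :=
  let out := (PySem.Chars.splitOn hand.toList ['\n']).map (fun line =>
    List.replicate (24 - line.length) ' ' ++ line.reverse.map (fun c => PySem.Dict.getD pvSwap c c))
  String.ofList (PySem.Chars.join ['\n'] out)

-- ===== PRECONDITION & SPEC =====
def Spec_reversed_hand (hand : String) (out : String) : Prop := out = reversed_hand_alt hand
instance (hand : String) (out : String) : Decidable (Spec_reversed_hand hand out) := by unfold Spec_reversed_hand; infer_instance

-- ===== CLAIM (what is proved, stated in full; the proofs are below) =====
def Claim_equal_reversed_hand : Prop := ∀ (hand : String), Dom_reversed_hand hand → Spec_reversed_hand hand (reversed_hand hand)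

-- ===== LEMMAS AND PROOFS =====

-- single-character replace is a pointwise map
theorem replace_go_single (a b : Char) (fuel : Nat) (l acc : List Char) (h : l.length ≤ fuel) :
    PySem.Chars.replace.go [a] [b] fuel l acc
      = acc.reverse ++ l.map (fun c => if c = a then b else c) := by
  induction fuel generalizing l acc with
  | zero =>
    have : l = [] := List.length_eq_zero_iff.mp (Nat.le_zero.mp h)
    subst this; simp [PySem.Chars.replace.go]
  | succ n ih =>
    cases l with
    | nil => simp [PySem.Chars.replace.go]
    | cons c t =>
      simp only [PySem.Chars.replace.go]
      by_cases hc : c = a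
      · subst hc
        have hpre : List.isPrefixOf [c] (c :: t) = true := by
          simp [List.isPrefixOf]
        rw [if_pos hpre]
        simp only [List.length_cons] at h
        simp only [List.length_cons, List.length_nil, List.drop_succ_cons, List.drop_zero]
        rw [ih t _ (by omega)]
        simp
      · have hpre : List.isPrefixOf [a] (c :: t) = true → False := by
          simp [List.isPrefixOf]; intro hh; exact hc (by simpa using hh.symm)
        rw [if_neg (by intro hh; exact hpre hh)]
        simp only [List.length_cons] at h
        rw [ih t _ (by omega)]
        simp [hc]

theorem replace_single (a b : Char) (s : List Char) :
    PySem.Chars.replace s [a] [b] = s.map (fun c => if c = a then b else c) := by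
  simpa using replace_go_single a b s.length s [] le_rfl

-- lines produced by splitting on '\n' contain no '\n'
theorem splitOn_go_no_sep (fuel : Nat) (l cur : List Char) (acc : List (List Char))
    (hl : l.length ≤ fuel) (hcur : '\n' ∉ cur) (hacc : ∀ p ∈ acc, '\n' ∉ p) :
    ∀ p ∈ PySem.Chars.splitOn.go ['\n'] fuel l cur acc, '\n' ∉ p := by
  induction fuel generalizing l cur acc with
  | zero =>
    have : l = [] := List.length_eq_zero_iff.mp (Nat.le_zero.mp hl)
    subst this
    simp only [PySem.Chars.splitOn.go]
    intro p hp
    simp only [List.mem_reverse, List.mem_cons] at hp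
    rcases hp with hp | hp
    · subst hp; simpa using hcur
    · exact hacc p hp
  | succ n ih =>
    cases l with
    | nil =>
      simp only [PySem.Chars.splitOn.go]
      intro p hp
      simp only [List.mem_reverse, List.mem_cons] at hp
      rcases hp with hp | hp
      · subst hp; simpa using hcur
      · exact hacc p hp
    | cons c t =>
      simp only [PySem.Chars.splitOn.go]
      by_cases hc : c = '\n'
      · subst hc
        rw [if_pos (by simp [List.isPrefixOf])]
        simp only [List.length_cons] at hl
        refine ih t [] _ (by omega) (by simp) ?_
        intro p hp
        simp only [List.mem_cons] at hp
        rcases hp with hp | hp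
        · subst hp; simpa using hcur
        · exact hacc p hp
      · rw [if_neg (by simp [List.isPrefixOf]; intro hh; exact hc (by simpa using hh.symm))]
        simp only [List.length_cons] at hl
        refine ih t (c :: cur) acc (by omega) ?_ hacc
        intro hp
        simp only [List.mem_cons] at hp
        rcases hp with hp | hp
        · exact hc hp.symm
        · exact hcur hp
-- wrapper for the above at the call site
theorem splitOn_newline_no_sep (s : List Char) :
    ∀ p ∈ PySem.Chars.splitOn s ['\n'], '\n' ∉ p := by
  have := splitOn_go_no_sep (s.length + 1) s [] [] (by omega) (by simp) (by simp)
  simpa [PySem.Chars.splitOn] using this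

-- one sentinel round  rl.replace(a,"\n").replace(b,a).replace("\n",b)  swaps a and b on a '\n'-free list
theorem sentinel_swap (a b : Char) (ha : a ≠ '\n') (hb : b ≠ '\n') (hab : a ≠ b) (s : List Char) (hs : '\n' ∉ s) :
    PySem.Chars.replace (PySem.Chars.replace (PySem.Chars.replace s [a] ['\n']) [b] [a]) ['\n'] [b]
      = s.map (fun c => if c = a then b else if c = b then a else c) := by
  rw [replace_single, replace_single, replace_single]
  simp only [List.map_map]
  apply List.map_congr_left
  intro c hc
  have hc' : c ≠ '\n' := fun he => hs (he ▸ hc)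
  by_cases h1 : c = a
  · simp [h1, Ne.symm hb]
  by_cases h2 : c = b
  · simp [h2, Ne.symm hab, ha]
  · simp [h1, h2, hc']

-- a swap of non-'\n' characters keeps a list '\n'-free
theorem swap_no_newline (a b : Char) (ha : a ≠ '\n') (hb : b ≠ '\n') (hab : a ≠ b) (s : List Char) (hs : '\n' ∉ s) :
    '\n' ∉ s.map (fun c => if c = a then b else if c = b then a else c) := by
  intro hmem
  rcases List.mem_map.mp hmem with ⟨c, hc, he⟩
  by_cases h1 : c = a
  · simp [h1] at he; exact hb he
  by_cases h2 : c = b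
  · simp [h2, Ne.symm hab] at he; exact ha he
  · simp [h1, h2] at he; exact hs (he ▸ hc)

-- the two swaps composed are exactly B's lookup in the four-entry table
theorem two_swaps_eq_table (c : Char) :
    (if (if c = '\\' then '/' else if c = '/' then '\\' else c) = '('
       then ')'
       else if (if c = '\\' then '/' else if c = '/' then '\\' else c) = ')'
       then '('
       else if c = '\\' then '/' else if c = '/' then '\\' else c)
      = PySem.Dict.getD pvSwap c c := by
  by_cases h1 : c = '\\'
  · simp [h1, pvSwap, PySem.Dict.getD, PySem.Dict.get?]
  by_cases h2 : c = '/'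
  · simp [h2, pvSwap, PySem.Dict.getD, PySem.Dict.get?]
  by_cases h3 : c = '('
  · simp [h3, pvSwap, PySem.Dict.getD, PySem.Dict.get?]
  by_cases h4 : c = ')'
  · simp [h4, pvSwap, PySem.Dict.getD, PySem.Dict.get?]
  · have b1 : ('\\' == c) = false := beq_eq_false_iff_ne.mpr (Ne.symm h1)
    have b2 : ('/' == c) = false := beq_eq_false_iff_ne.mpr (Ne.symm h2)
    have b3 : ('(' == c) = false := beq_eq_false_iff_ne.mpr (Ne.symm h3)
    have b4 : (')' == c) = false := beq_eq_false_iff_ne.mpr (Ne.symm h4)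
    simp [h1, h2, h3, h4, pvSwap, PySem.Dict.getD, PySem.Dict.get?, List.find?, b1, b2, b3, b4]

-- per-line equality
theorem line_eq (line : List Char) (h : '\n' ∉ line) :
    (let rline := (PySem.List.slice? (line ++ List.replicate (24 - line.length) ' ') none none (-1)).getD []
     ([(['\\'], ['/']), (['('], [')'])] : List (List Char × List Char)).foldl (fun rl p =>
       PySem.Chars.replace (PySem.Chars.replace (PySem.Chars.replace rl p.1 ['\n']) p.2 p.1) ['\n'] p.2) rline)
      = List.replicate (24 - line.length) ' ' ++ line.reverse.map (fun c => PySem.Dict.getD pvSwap c c) := by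
  simp only [List.foldl_cons, List.foldl_nil]
  rw [PySem.List.slice?_none_none_neg_one]
  simp only [Option.getD_some, List.reverse_append, List.reverse_replicate]
  have h0 : '\n' ∉ List.replicate (24 - line.length) ' ' ++ line.reverse := by
    intro hmem
    rcases List.mem_append.mp hmem with hmem | hmem
    · exact absurd (List.eq_of_mem_replicate hmem) (by decide)
    · exact h (List.mem_reverse.mp hmem)
  rw [sentinel_swap '\\' '/' (by decide) (by decide) (by decide) _ h0,
      sentinel_swap '(' ')' (by decide) (by decide) (by decide) _
        (swap_no_newline '\\' '/' (by decide) (by decide) (by decide) _ h0)]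
  simp only [List.map_map, List.map_append, List.map_replicate, Function.comp_def]
  rw [List.map_congr_left (fun c _ => two_swaps_eq_table c)]
  exact congrArg₂ (· ++ ·) (congrArg _ (by decide)) rfl

-- ===== VERDICT (by name: the statement is the Claim_ definition above) =====
theorem reversed_hand_spec : Claim_equal_reversed_hand := by
  intro hand _
  unfold Spec_reversed_hand
  simp only [reversed_hand, reversed_hand_alt]
  refine congrArg String.ofList (congrArg (PySem.Chars.join ['\n']) (List.map_congr_left ?_))
  intro line hline
  exact line_eq line (splitOn_newline_no_sep hand.toList line hline)
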